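-- pv_equiv track=rewrite | github.com/miliar/Code_Jam_Webscraper | solutions_python/solutions_year17_round0_nr3/40.py | rec
-- ===== SOURCE A (Python) =====
-- def rec(N,K):
--     if K == 0:
--         return (N, N)
--     if K == 1:
--         return ((N-1)//2, (N-1)//2 + (N-1)%2)
--     else:
--         if N%2 == 1:
--             return rec(N//2, (K-1)//2 + (K-1)%2)
--         else:
--             return rec((N-1)//2 + (K-1)%2, (K-1)//2 + (K-1)%2)
-- ===== SOURCE B (Python) =====
-- def rec(N, K):
--     # iterative version of the seating recursion: same state updates, no call stack
--     while K >= 2: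
--         if N % 2 == 1:
--             N = N // 2
--         else:
--             N = (N - 1) // 2 + (K - 1) % 2
--         K = (K - 1) // 2 + (K - 1) % 2
--     if K == 0:
--         return (N, N)
--     if K == 1:
--         return ((N - 1) // 2, (N - 1) // 2 + (N - 1) % 2)
--     raise ValueError("K must be nonnegative")
-- ===== Notes on version B (the rewrite author's own statement) =====
-- stated objective: alternative
-- what changed: Replaces the tail recursion with an explicit while-loop that updates (N, K) in place (new N computed from the old K before K is reassigned), eliminating the call stack.
import Mathlib
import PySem

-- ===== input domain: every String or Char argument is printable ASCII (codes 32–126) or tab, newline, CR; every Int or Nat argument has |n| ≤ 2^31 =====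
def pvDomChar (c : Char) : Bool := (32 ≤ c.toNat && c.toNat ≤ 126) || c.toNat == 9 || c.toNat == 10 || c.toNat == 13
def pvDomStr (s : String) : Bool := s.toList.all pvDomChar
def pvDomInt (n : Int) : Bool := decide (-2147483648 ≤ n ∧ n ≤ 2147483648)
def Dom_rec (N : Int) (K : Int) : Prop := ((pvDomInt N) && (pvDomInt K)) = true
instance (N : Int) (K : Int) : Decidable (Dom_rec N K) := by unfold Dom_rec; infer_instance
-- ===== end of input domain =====

-- B is the same state machine written as an explicit while-loop instead of tail recursion; A = B on K ≥ 0.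

-- ===== PORT A =====
-- fuel makes the recursion total in Lean; K.toNat + 1 steps suffice whenever the Python returns (K ≥ 0)
def recAux : Nat → Int → Int → Int × Int
  | 0, _, _ => (0, 0)
  | fuel + 1, N, K =>
    if K = 0 then (N, N)
    else if K = 1 then
      (PySem.Int.floordiv (N - 1) 2,
       PySem.Int.floordiv (N - 1) 2 + PySem.Int.mod (N - 1) 2)
    else
      if PySem.Int.mod N 2 = 1 then
        recAux fuel (PySem.Int.floordiv N 2)
          (PySem.Int.floordiv (K - 1) 2 + PySem.Int.mod (K - 1) 2)
      else
        recAux fuel (PySem.Int.floordiv (N - 1) 2 + PySem.Int.mod (K - 1) 2)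
          (PySem.Int.floordiv (K - 1) 2 + PySem.Int.mod (K - 1) 2)

def rec (N : Int) (K : Int) : Int × Int := recAux (K.toNat + 1) N K

-- ===== PORT B =====
-- the code after B's while-loop; the final branch is Source B's `raise ValueError`,
-- unreachable inside Pre_rec (the loop only exits with K ≤ 1, and K stays ≥ 0)
def recAltFinish (N : Int) (K : Int) : Int × Int :=
  if K = 0 then (N, N)
  else if K = 1 then
    (PySem.Int.floordiv (N - 1) 2,
     PySem.Int.floordiv (N - 1) 2 + PySem.Int.mod (N - 1) 2)
  else (0, 0)  -- raise ValueError: outside Pre_rec, arbitrary value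

-- B's while-loop, with fuel; K.toNat iterations suffice since K strictly decreases while K ≥ 2
def recAltLoop : Nat → Int → Int → Int × Int
  | 0, N, K => recAltFinish N K
  | fuel + 1, N, K =>
    if K ≥ 2 then
      let N' := if PySem.Int.mod N 2 = 1 then PySem.Int.floordiv N 2
                else PySem.Int.floordiv (N - 1) 2 + PySem.Int.mod (K - 1) 2
      recAltLoop fuel N' (PySem.Int.floordiv (K - 1) 2 + PySem.Int.mod (K - 1) 2)
    else recAltFinish N K

def rec_alt (N : Int) (K : Int) : Int × Int := recAltLoop K.toNat N K

-- ===== PRECONDITION & SPEC =====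
-- Pre_ excludes K < 0: there A recurses forever (RecursionError) and B raises ValueError
def Pre_rec (N : Int) (K : Int) : Prop := 0 ≤ K
instance (N : Int) (K : Int) : Decidable (Pre_rec N K) := by unfold Pre_rec; infer_instance
def pvWitness_rec : Int × Int := (5, 3)

def Spec_rec (N : Int) (K : Int) (out : Int × Int) : Prop := out = rec_alt N K
instance (N : Int) (K : Int) (out : Int × Int) : Decidable (Spec_rec N K out) := by unfold Spec_rec; infer_instance

-- ===== CLAIM (what is proved, stated in full; the proofs are below) =====
def Claim_equal_rec : Prop := ∀ (N : Int) (K : Int), Dom_rec N K → Pre_rec N K → Spec_rec N K (rec N K)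

-- ===== LEMMAS AND PROOFS =====

-- the common successor value of K, and its bounds for K ≥ 2
theorem nextK_bounds (K : Int) (h2 : 2 ≤ K) :
    1 ≤ PySem.Int.floordiv (K - 1) 2 + PySem.Int.mod (K - 1) 2 ∧
    PySem.Int.floordiv (K - 1) 2 + PySem.Int.mod (K - 1) 2 < K := by
  have hdm := PySem.Int.floordiv_mul_add_mod (K - 1) 2
  have hm0 : 0 ≤ PySem.Int.mod (K - 1) 2 := PySem.Int.mod_nonneg _ (by omega)
  have hm2 : PySem.Int.mod (K - 1) 2 < 2 := PySem.Int.mod_lt _ (by omega)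
  omega

-- one sufficient-fuel step of equivalence, by induction on the fuel bound
theorem recAux_eq_loop (n : Nat) : ∀ (N K : Int), 0 ≤ K → K.toNat ≤ n →
    recAux (n + 1) N K = recAltLoop n N K := by
  induction n with
  | zero =>
    intro N K h0 hn
    have : K = 0 := by omega
    subst this
    simp [recAux, recAltLoop, recAltFinish]
  | succ n ih =>
    intro N K h0 hn
    by_cases hK0 : K = 0
    · subst hK0; simp [recAux, recAltLoop, recAltFinish]
    · by_cases hK1 : K = 1
      · subst hK1; simp [recAux, recAltLoop, recAltFinish]
      · have h2 : 2 ≤ K := by omega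
        obtain ⟨hlo, hhi⟩ := nextK_bounds K h2
        have hstep : recAux (n + 1 + 1) N K =
            recAux (n + 1) (if PySem.Int.mod N 2 = 1 then PySem.Int.floordiv N 2
              else PySem.Int.floordiv (N - 1) 2 + PySem.Int.mod (K - 1) 2)
              (PySem.Int.floordiv (K - 1) 2 + PySem.Int.mod (K - 1) 2) := by
          conv_lhs => rw [recAux]
          rw [if_neg hK0, if_neg hK1]
          by_cases hp : PySem.Int.mod N 2 = 1
          · rw [if_pos hp, if_pos hp]
          · rw [if_neg hp, if_neg hp]
        rw [hstep]
        have hloop : recAltLoop (n + 1) N K =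
            recAltLoop n (if PySem.Int.mod N 2 = 1 then PySem.Int.floordiv N 2
              else PySem.Int.floordiv (N - 1) 2 + PySem.Int.mod (K - 1) 2)
              (PySem.Int.floordiv (K - 1) 2 + PySem.Int.mod (K - 1) 2) := by
          simp [recAltLoop, h2]
        rw [hloop]
        exact ih _ _ (by omega) (by omega)

-- ===== VERDICT (by name: the statement is the Claim_ definition above) =====
theorem rec_spec : Claim_equal_rec := by
  intro N K _ hpre
  unfold Spec_rec rec rec_alt
  exact recAux_eq_loop K.toNat N K hpre (by omega)
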